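-- pv_equiv track=rewrite | github.com/kranti1/ML-Classes | Winter2015/ml1_bayesian_inference_homework.py | GetAllOutputVariables
-- ===== SOURCE A (Python) =====
-- g_COND_PROBS = {
--
--     'PHONE' : { "":0.1 },      # (this is the prior probability for the root variable PHONE; it depends on nothing)
--
--     'WALKMAN' : { "PHONE":0.05, "!PHONE":0.1 },
--
--     'RADIO' : { "PHONE,WALKMAN":0.2,  "PHONE,!WALKMAN":0.4,  "!PHONE,WALKMAN":0.3,  "!PHONE,!WALKMAN":0.6  },
--
--     'BATTERIES' : {
--                               "PHONE,RADIO,WALKMAN":0.8,  "PHONE,RADIO,!WALKMAN":0.7,  "PHONE,!RADIO,WALKMAN":0.5,  "PHONE,!RADIO,!WALKMAN":0.4,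
--                               "!PHONE,RADIO,WALKMAN":0.6,  "!PHONE,RADIO,!WALKMAN":0.3,  "!PHONE,!RADIO,WALKMAN":0.2,  "!PHONE,!RADIO,!WALKMAN":0.0
--                          },
--
--     'CHARGER' : { "BATTERIES":0.4, "!BATTERIES":0.9 },
--   }
--
-- g_ALL_VARIABLES = [ "PHONE", "WALKMAN", "RADIO", "BATTERIES", "CHARGER" ];
--
-- def GetAllInputVariables(var_name, include_neg_vars=False):
--   input_vars_map = {}
--
--   if var_name in g_COND_PROBS:
--     prob_keys_map = g_COND_PROBS[var_name]
--
--     for compound_var_key in prob_keys_map:      # compound_var_key is like e.g.  "PHONE,!RADIO,WALKMAN"  from inside g_COND_PROBS{} .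
--       pos_neg_keys_list = compound_var_key.split(',') if compound_var_key else []    # split into e.g. [ "PHONE", "!RADIO", "WALKMAN" ]
--       for pos_neg_key in pos_neg_keys_list:
--         if (pos_neg_key[0] != '!') or include_neg_vars:
--           input_vars_map[pos_neg_key] = 1
--
--
--   input_vars_list = input_vars_map.keys()
--
--   return input_vars_list
--
-- def GetAllOutputVariables(var_name):
--   output_vars_list = []
--
--   #
--   #  Walk all the OTHER variables
--   #
--   for other_var_key in g_ALL_VARIABLES:
--     if (other_var_key != var_name) and not (other_var_key in output_vars_list) :
--       #
--       # Get the INPUT variables for this other variable.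
--       #
--       input_vars_list = GetAllInputVariables(other_var_key)
--       if var_name in input_vars_list:
--         #
--         # var_name is an INPUT for other_var_key.  That means other_var_key is an OUTPUT for var_name.
--         #
--         output_vars_list.append(other_var_key)
--
--   return output_vars_list
-- ===== SOURCE B (Python) =====
-- g_COND_PROBS = {
--
--     'PHONE' : { "":0.1 },
--
--     'WALKMAN' : { "PHONE":0.05, "!PHONE":0.1 },
--
--     'RADIO' : { "PHONE,WALKMAN":0.2,  "PHONE,!WALKMAN":0.4,  "!PHONE,WALKMAN":0.3,  "!PHONE,!WALKMAN":0.6  },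
--
--     'BATTERIES' : {
--                               "PHONE,RADIO,WALKMAN":0.8,  "PHONE,RADIO,!WALKMAN":0.7,  "PHONE,!RADIO,WALKMAN":0.5,  "PHONE,!RADIO,!WALKMAN":0.4,
--                               "!PHONE,RADIO,WALKMAN":0.6,  "!PHONE,RADIO,!WALKMAN":0.3,  "!PHONE,!RADIO,WALKMAN":0.2,  "!PHONE,!RADIO,!WALKMAN":0.0
--                          },
--
--     'CHARGER' : { "BATTERIES":0.4, "!BATTERIES":0.9 },
--   }
--
-- g_ALL_VARIABLES = [ "PHONE", "WALKMAN", "RADIO", "BATTERIES", "CHARGER" ];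
--
-- def GetAllOutputVariables(var_name):
--   # Build the reverse-adjacency index in one pass over the CPT table itself
--   # (its insertion order is g_ALL_VARIABLES' order), then answer by one lookup.
--   reverse_map = {}
--   for child, table in g_COND_PROBS.items():
--     seen = set()
--     for compound_key in table:
--       for tok in (compound_key.split(',') if compound_key else []):
--         if not tok.startswith('!') and tok != child and tok not in seen:
--           seen.add(tok)
--           reverse_map.setdefault(tok, []).append(child)
--   return reverse_map.get(var_name, [])
-- ===== Notes on version B (the rewrite author's own statement) =====
-- stated objective: alternative
-- what changed: B replaces A's per-target scan (for each variable, recompute its positive-input set via the GetAllInputVariables helper and test membership of var_name) with a single pass directly over the CPT table g_COND_PROBS that parses each compound key, dedupes tokens with a set, and builds a reverse-adjacency dictionary, answering with one lookup.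
import Mathlib
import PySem

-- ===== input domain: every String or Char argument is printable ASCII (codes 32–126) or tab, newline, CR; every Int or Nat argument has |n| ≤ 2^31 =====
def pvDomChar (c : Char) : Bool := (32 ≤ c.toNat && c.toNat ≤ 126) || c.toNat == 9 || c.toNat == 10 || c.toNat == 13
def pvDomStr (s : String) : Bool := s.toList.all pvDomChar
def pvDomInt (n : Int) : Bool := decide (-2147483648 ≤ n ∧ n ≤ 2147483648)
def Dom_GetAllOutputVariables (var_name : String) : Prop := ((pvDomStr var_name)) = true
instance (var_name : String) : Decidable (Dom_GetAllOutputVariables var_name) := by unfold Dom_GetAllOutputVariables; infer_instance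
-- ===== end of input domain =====

-- B builds a reverse-adjacency index in one pass over the CPT table and answers by one lookup (alternative decomposition, same cost).
-- The float probability values of g_COND_PROBS are never read by either function (only the keys are);
-- they are ported as Unit, which is exact for these computations.

-- ===== PORT A =====
def g_COND_PROBS : PySem.Dict String (PySem.Dict String Unit) := PySem.Dict.ofList
  [ ("PHONE", PySem.Dict.ofList [("", ())]),
    ("WALKMAN", PySem.Dict.ofList [("PHONE", ()), ("!PHONE", ())]),
    ("RADIO", PySem.Dict.ofList [("PHONE,WALKMAN", ()), ("PHONE,!WALKMAN", ()), ("!PHONE,WALKMAN", ()), ("!PHONE,!WALKMAN", ())]),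
    ("BATTERIES", PySem.Dict.ofList
      [("PHONE,RADIO,WALKMAN", ()), ("PHONE,RADIO,!WALKMAN", ()), ("PHONE,!RADIO,WALKMAN", ()), ("PHONE,!RADIO,!WALKMAN", ()),
       ("!PHONE,RADIO,WALKMAN", ()), ("!PHONE,RADIO,!WALKMAN", ()), ("!PHONE,!RADIO,WALKMAN", ()), ("!PHONE,!RADIO,!WALKMAN", ())]),
    ("CHARGER", PySem.Dict.ofList [("BATTERIES", ()), ("!BATTERIES", ())]) ]

def g_ALL_VARIABLES : List String := ["PHONE", "WALKMAN", "RADIO", "BATTERIES", "CHARGER"]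

-- module helper used by A
def GetAllInputVariables (var_name : String) (include_neg_vars : Bool) : List String :=
  let input_vars_map : PySem.Dict String Int :=
    if g_COND_PROBS.contains var_name then
      let prob_keys_map := g_COND_PROBS.getD var_name PySem.Dict.empty
      prob_keys_map.keys.foldl (fun m compound_var_key =>
        let pos_neg_keys_list := if compound_var_key ≠ "" then (PySem.Str.split? compound_var_key ",").getD [] else []
        pos_neg_keys_list.foldl (fun m pos_neg_key =>
          if (PySem.Str.pyGet? pos_neg_key 0 ≠ some '!') || include_neg_vars then
            m.insert pos_neg_key 1
          else m) m) PySem.Dict.empty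
    else PySem.Dict.empty
  input_vars_map.keys

def GetAllOutputVariables (var_name : String) : List String :=
  g_ALL_VARIABLES.foldl (fun output_vars_list other_var_key =>
    if other_var_key ≠ var_name ∧ other_var_key ∉ output_vars_list then
      if var_name ∈ GetAllInputVariables other_var_key false then
        output_vars_list ++ [other_var_key]
      else output_vars_list
    else output_vars_list) []

-- ===== PORT B =====
def GetAllOutputVariables_alt (var_name : String) : List String :=
  let reverse_map : PySem.Dict String (List String) :=
    g_COND_PROBS.items.foldl (fun reverse_map child_table =>
      let child := child_table.1
      let table := child_table.2
      (table.keys.foldl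
        (fun (st : PySem.Dict String (List String) × PySem.Set String) compound_key =>
          (if compound_key ≠ "" then (PySem.Str.split? compound_key ",").getD [] else []).foldl
            (fun st tok =>
              if ¬ (PySem.Str.startswith tok "!" = true) ∧ tok ≠ child ∧ ¬ (tok ∈ st.2) then
                -- seen.add(tok); reverse_map.setdefault(tok, []).append(child)
                (st.1.insert tok ((st.1.getD tok []) ++ [child]), st.2.add tok)
              else st) st)
        (reverse_map, (PySem.Set.empty : PySem.Set String))).1)
      PySem.Dict.empty
  reverse_map.getD var_name []

-- ===== PRECONDITION & SPEC =====
def Spec_GetAllOutputVariables (var_name : String) (out : List String) : Prop := out = GetAllOutputVariables_alt var_name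
instance (var_name : String) (out : List String) : Decidable (Spec_GetAllOutputVariables var_name out) := by unfold Spec_GetAllOutputVariables; infer_instance

-- ===== CLAIM (what is proved, stated in full; the proofs are below) =====
def Claim_equal_GetAllOutputVariables : Prop := ∀ (var_name : String), Dom_GetAllOutputVariables var_name → Spec_GetAllOutputVariables var_name (GetAllOutputVariables var_name)

-- ===== LEMMAS AND PROOFS =====
-- evaluated facts about the two concrete programs (closed computations)
theorem inputs_PHONE : GetAllInputVariables "PHONE" false = [] := by decide
theorem inputs_WALKMAN : GetAllInputVariables "WALKMAN" false = ["PHONE"] := by decide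
theorem inputs_RADIO : GetAllInputVariables "RADIO" false = ["PHONE", "WALKMAN"] := by decide
theorem inputs_BATTERIES : GetAllInputVariables "BATTERIES" false = ["PHONE", "RADIO", "WALKMAN"] := by decide
theorem inputs_CHARGER : GetAllInputVariables "CHARGER" false = ["BATTERIES"] := by decide

-- B's reverse map is a closed computation; only the final lookup depends on var_name
theorem alt_closed_form (v : String) : GetAllOutputVariables_alt v =
    (PySem.Dict.mk
      [("PHONE", ["WALKMAN", "RADIO", "BATTERIES"]),
       ("WALKMAN", ["RADIO", "BATTERIES"]),
       ("RADIO", ["BATTERIES"]),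
       ("BATTERIES", ["CHARGER"])]).getD v [] := rfl

-- ===== VERDICT (by name: the statement is the Claim_ definition above) =====
theorem GetAllOutputVariables_spec : Claim_equal_GetAllOutputVariables := by
  intro var_name _
  unfold Spec_GetAllOutputVariables
  by_cases h1 : var_name = "PHONE"; · subst h1; decide
  by_cases h2 : var_name = "WALKMAN"; · subst h2; decide
  by_cases h3 : var_name = "RADIO"; · subst h3; decide
  by_cases h4 : var_name = "BATTERIES"; · subst h4; decide
  rw [alt_closed_form]
  simp [GetAllOutputVariables, g_ALL_VARIABLES, List.foldl,
    inputs_PHONE, inputs_WALKMAN, inputs_RADIO, inputs_BATTERIES, inputs_CHARGER,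
    PySem.Dict.getD, PySem.Dict.get?, h1, h2, h3, h4,
    Ne.symm h1, Ne.symm h2, Ne.symm h3, Ne.symm h4]
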